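-- pv_equiv track=rewrite | github.com/OpenBB-finance/OpenBB | openbb_sdk/builtin_extensions/providers/router/openbb_provider_router.py | fix_path
-- ===== SOURCE A (Python) =====
-- def fix_path(path: str) -> str:
--     """Fixes the path by trimming underscores in between single letters.
--     Example: s_e_c_filings -> sec_fillings
--
--     Parameter
--     ---------
--         path (str): The path of the endpoint.
--
--     Return
--     -------
--         str: The updated path of the endpoint.
--     """
--     words = path.split("_")
--     merged_words = []
--     merged_word = []
--
--     for word in words:
--         if len(word) == 1:
--             merged_word.append(word)
--         else:
--             if merged_word:
--                 merged_words.append("".join(merged_word))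
--                 merged_word = []
--             merged_words.append(word)
--
--     if merged_word:
--         merged_words.append("".join(merged_word))
--
--     return "_".join(merged_words)
-- ===== SOURCE B (Python) =====
-- def fix_path(path: str) -> str:
--     # One left-to-right scan over the characters: emit each token as met and
--     # drop an underscore exactly when it separates two single-letter tokens.
--     out = []
--     s = path
--     n = len(s)
--     i = 0
--     while i < n:
--         if s[i] == '_':
--             out.append('_')
--             i += 1
--             continue
--         j = i
--         while j < n and s[j] != '_':
--             j += 1
--         tok = s[i:j]
--         if j - i == 1 and j < n:
--             k = j + 1
--             while k < n and s[k] != '_':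
--                 k += 1
--             if k == j + 2:
--                 out.append(tok)      # drop the separating underscore
--                 i = j + 1
--                 continue
--         out.append(tok)
--         if j < n:
--             out.append('_')
--         i = j + 1
--     return ''.join(out)
-- ===== Notes on version B (the rewrite author's own statement) =====
-- stated objective: alternative
-- what changed: A splits the path into a token list, folds over it accumulating runs of single-letter tokens and joins the result; B makes one left-to-right scan over the characters, emitting tokens directly and dropping an underscore exactly when it separates two single-letter tokens.
import Mathlib
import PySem

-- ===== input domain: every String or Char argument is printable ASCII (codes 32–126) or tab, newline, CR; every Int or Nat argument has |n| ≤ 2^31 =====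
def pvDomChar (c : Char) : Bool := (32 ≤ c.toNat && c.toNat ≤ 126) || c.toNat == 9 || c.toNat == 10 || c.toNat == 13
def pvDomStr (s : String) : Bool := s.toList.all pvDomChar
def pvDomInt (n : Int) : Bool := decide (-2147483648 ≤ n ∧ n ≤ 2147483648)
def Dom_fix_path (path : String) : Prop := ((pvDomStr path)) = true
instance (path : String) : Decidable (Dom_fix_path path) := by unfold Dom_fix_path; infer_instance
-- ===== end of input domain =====

-- B replaces A's split/accumulate/join over the token list by a single left-to-right
-- character scan that emits tokens directly and drops an underscore exactly when it
-- separates two single-letter tokens (objective: alternative; same asymptotic cost).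


-- ===== PORT A =====
-- words = path.split("_"); fold over the words with state (merged_words, merged_word);
-- final flush; "_".join(merged_words).  (Ported on List Char via PySem.Chars.)
def fix_path (path : String) : String :=
  let words := PySem.Chars.splitOn path.toList ['_']
  let st := words.foldl
    (fun (st : List (List Char) × List (List Char)) w =>
      if w.length = 1 then (st.1, st.2 ++ [w])
      else if st.2 ≠ [] then (st.1 ++ [PySem.Chars.join [] st.2, w], [])
      else (st.1 ++ [w], st.2))
    ([], [])
  let merged := if st.2 ≠ [] then st.1 ++ [PySem.Chars.join [] st.2] else st.1
  String.mk (PySem.Chars.join ['_'] merged)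

-- ===== PORT B =====
-- B's scan: at a token boundary, copy an underscore, or read the whole token
-- (takeWhile/dropWhile = Source B's inner while loop), peek at the next token's length
-- and decide whether to keep the separating underscore.
def fix_path_go : List Char → List Char
  | [] => []
  | c :: rest =>
    if h : c = '_' then '_' :: fix_path_go rest
    else
      let tok := List.takeWhile (· ≠ '_') (c :: rest)
      match hr : List.dropWhile (· ≠ '_') (c :: rest) with
      | [] => tok
      | x :: rest2 =>
        if tok.length = 1 ∧ (List.takeWhile (· ≠ '_') rest2).length = 1
        then tok ++ fix_path_go rest2          -- drop the separating underscore
        else tok ++ '_' :: fix_path_go rest2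
termination_by cs => cs.length
decreasing_by
  · simp
  all_goals
    have hd : List.dropWhile (· ≠ '_') rest = x :: rest2 := by
      simpa [List.dropWhile, h] using hr
    have := List.length_dropWhile_le (· ≠ '_') rest
    rw [hd] at this; simp at this ⊢; omega

def fix_path_alt (path : String) : String := String.mk (fix_path_go path.toList)

-- ===== PRECONDITION & SPEC =====
def Spec_fix_path (path : String) (out : String) : Prop := out = fix_path_alt path
instance (path : String) (out : String) : Decidable (Spec_fix_path path out) := by unfold Spec_fix_path; infer_instance

-- ===== CLAIM (what is proved, stated in full; the proofs are below) =====
def Claim_equal_fix_path : Prop := ∀ (path : String), Dom_fix_path path → Spec_fix_path path (fix_path path)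

-- ===== LEMMAS AND PROOFS =====

-- simple structural version of splitting on a single underscore
def pvSplitU : List Char → List (List Char)
  | [] => [[]]
  | c :: rest =>
    if c = '_' then [] :: pvSplitU rest
    else match pvSplitU rest with
      | [] => [[c]]
      | w :: ws => (c :: w) :: ws

-- A's merging loop, written as structural recursion on the word list
def pvMrg : List (List Char) → List (List Char) → List (List Char)
  | [], pend => if pend = [] then [] else [PySem.Chars.join [] pend]
  | w :: ws, pend =>
    if w.length = 1 then pvMrg ws (pend ++ [w])
    else (if pend = [] then [w] else [PySem.Chars.join [] pend, w]) ++ pvMrg ws []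

-- A's loop body and final flush, named for the foldl lemma
def pvStep (st : List (List Char) × List (List Char)) (w : List Char) :
    List (List Char) × List (List Char) :=
  if w.length = 1 then (st.1, st.2 ++ [w])
  else if st.2 ≠ [] then (st.1 ++ [PySem.Chars.join [] st.2, w], [])
  else (st.1 ++ [w], st.2)

def pvFin (st : List (List Char) × List (List Char)) : List (List Char) :=
  if st.2 ≠ [] then st.1 ++ [PySem.Chars.join [] st.2] else st.1

theorem pvSplitU_ne_nil (cs : List Char) : pvSplitU cs ≠ [] := by
  cases cs with
  | nil => simp [pvSplitU]
  | cons c rest =>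
    simp only [pvSplitU]
    split_ifs with h
    · simp
    · cases pvSplitU rest <;> simp

theorem pvMrg_ne_nil : ∀ (ws pend : List (List Char)), ws ≠ [] ∨ pend ≠ [] → pvMrg ws pend ≠ [] := by
  intro ws
  induction ws with
  | nil => intro pend h; simp only [pvMrg]; split_ifs with hp <;> simp_all
  | cons w ws ih =>
    intro pend _
    simp only [pvMrg]
    split_ifs with h1 hp
    · exact ih (pend ++ [w]) (Or.inr (by simp))
    · simp
    · simp

theorem pvJoin_empty_cons (x : List Char) (pend : List (List Char)) :
    PySem.Chars.join [] (x :: pend) = x ++ PySem.Chars.join [] pend := by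
  cases pend with
  | nil => simp [PySem.Chars.join_singleton, PySem.Chars.join_nil]
  | cons q r => rw [PySem.Chars.join_cons_cons]; simp

-- the chain lemma: pushing one more pending single word x in front of a nonempty pend
theorem pvMrg_chain : ∀ (ws : List (List Char)) (pend : List (List Char)) (x : List Char),
    pend ≠ [] →
    PySem.Chars.join ['_'] (pvMrg ws (x :: pend)) = x ++ PySem.Chars.join ['_'] (pvMrg ws pend) := by
  intro ws
  induction ws with
  | nil =>
    intro pend x hp
    simp only [pvMrg]
    rw [if_neg (by simp), if_neg hp, PySem.Chars.join_singleton, PySem.Chars.join_singleton,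
      pvJoin_empty_cons]
  | cons w ws ih =>
    intro pend x hp
    simp only [pvMrg]
    by_cases h1 : w.length = 1
    · rw [if_pos h1, if_pos h1, show x :: pend ++ [w] = x :: (pend ++ [w]) from by simp]
      exact ih (pend ++ [w]) x (by simp)
    · rw [if_neg h1, if_neg h1, if_neg (show ¬(x :: pend = []) from by simp), if_neg hp]
      simp only [List.cons_append, List.nil_append]
      rw [PySem.Chars.join_cons_cons, PySem.Chars.join_cons_cons, pvJoin_empty_cons]
      simp

-- same, when the head of ws is itself a single-letter word (pend may be empty)
theorem pvMrg_chain_single (w : List Char) (ws : List (List Char)) (pend : List (List Char))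
    (x : List Char) (hw : w.length = 1) :
    PySem.Chars.join ['_'] (pvMrg (w :: ws) (x :: pend)) =
      x ++ PySem.Chars.join ['_'] (pvMrg (w :: ws) pend) := by
  simp only [pvMrg, if_pos hw]
  rw [show x :: pend ++ [w] = x :: (pend ++ [w]) from by simp]
  exact pvMrg_chain ws (pend ++ [w]) x (by simp)

-- head/tail decomposition of pvSplitU via takeWhile/dropWhile
theorem pvSplitU_decomp : ∀ (cs : List Char),
    pvSplitU cs = cs.takeWhile (· ≠ '_') ::
      (match cs.dropWhile (· ≠ '_') with | [] => [] | _ :: r => pvSplitU r) := by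
  intro cs
  induction cs with
  | nil => simp [pvSplitU]
  | cons c rest ih =>
    by_cases h : c = '_'
    · subst h
      simp [pvSplitU, List.takeWhile, List.dropWhile]
    · simp only [pvSplitU, if_neg h, List.takeWhile_cons, List.dropWhile_cons]
      rw [ih]
      simp [h]

-- the fuel-based PySem.Chars.splitOn.go computes pvSplitU
theorem pvGo_eq : ∀ (fuel : Nat) (l cur : List Char) (acc : List (List Char))
    (w : List Char) (ws : List (List Char)),
    pvSplitU l = w :: ws → l.length < fuel →
    PySem.Chars.splitOn.go ['_'] fuel l cur acc = acc.reverse ++ (cur.reverse ++ w) :: ws := by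
  intro fuel
  induction fuel with
  | zero => intro l cur acc w ws _ hlt; omega
  | succ fuel ih =>
    intro l cur acc w ws hs hlt
    cases l with
    | nil =>
      simp only [pvSplitU] at hs
      cases hs
      rw [PySem.Chars.splitOn.go.eq_def]
      simp
    | cons c rest =>
      rw [show PySem.Chars.splitOn.go ['_'] (fuel+1) (c::rest) cur acc =
        if List.isPrefixOf ['_'] (c::rest) = true then
          PySem.Chars.splitOn.go ['_'] fuel (List.drop 1 (c::rest)) [] (cur.reverse :: acc)
        else PySem.Chars.splitOn.go ['_'] fuel rest (c::cur) acc from rfl]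
      obtain ⟨w', ws', hsr⟩ : ∃ w' ws', pvSplitU rest = w' :: ws' := by
        cases hh : pvSplitU rest with
        | nil => exact absurd hh (pvSplitU_ne_nil rest)
        | cons a b => exact ⟨a, b, rfl⟩
      by_cases h : c = '_'
      · subst h
        simp [pvSplitU, hsr] at hs
        have hpre : List.isPrefixOf ['_'] ('_' :: rest) = true := by
          simp [List.isPrefixOf]
        rw [if_pos hpre]
        have hrec := ih rest [] (cur.reverse :: acc) w' ws' hsr
          (by simp only [List.length_cons] at hlt; omega)
        simp only [List.drop_succ_cons, List.drop_zero] at *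
        rw [hrec]
        simp [hs.1, ← hs.2]
      · have hpre : List.isPrefixOf ['_'] (c :: rest) = false := by
          simp [List.isPrefixOf]; exact fun hc => h hc.symm
        rw [hpre]
        simp only [Bool.false_eq_true, if_false]
        simp only [pvSplitU, if_neg h, hsr] at hs
        rw [List.cons.injEq] at hs
        have hrec := ih rest (c :: cur) acc w' ws' hsr
          (by simp only [List.length_cons] at hlt; omega)
        rw [hrec, ← hs.1, ← hs.2]
        simp

theorem pvSplitOn_eq (cs : List Char) : PySem.Chars.splitOn cs ['_'] = pvSplitU cs := by
  obtain ⟨w, ws, hs⟩ : ∃ w ws, pvSplitU cs = w :: ws := by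
    cases hh : pvSplitU cs with
    | nil => exact absurd hh (pvSplitU_ne_nil cs)
    | cons a b => exact ⟨a, b, rfl⟩
  unfold PySem.Chars.splitOn
  rw [pvGo_eq (cs.length + 1) cs [] [] w ws hs (by omega), hs]
  simp

-- A's foldl loop plus the final flush equals pvMrg
theorem pvFoldl_mrg : ∀ (ws : List (List Char)) (acc pend : List (List Char)),
    pvFin (ws.foldl pvStep (acc, pend)) = acc ++ pvMrg ws pend := by
  intro ws
  induction ws with
  | nil =>
    intro acc pend
    simp only [List.foldl_nil, pvFin, pvMrg]
    split_ifs with h <;> simp_all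
  | cons w ws ih =>
    intro acc pend
    simp only [List.foldl_cons, pvMrg]
    by_cases h1 : w.length = 1
    · rw [show pvStep (acc, pend) w = (acc, pend ++ [w]) from by simp [pvStep, h1]]
      rw [ih, if_pos h1]
    · by_cases h2 : pend = []
      · rw [show pvStep (acc, pend) w = (acc ++ [w], pend) from by simp [pvStep, h1, h2]]
        rw [ih, if_neg h1, if_pos h2, h2]
        simp
      · rw [show pvStep (acc, pend) w = (acc ++ [PySem.Chars.join [] pend, w], []) from by
          simp [pvStep, h1, h2]]
        rw [ih, if_neg h1, if_neg h2]
        simp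

-- equation lemmas for fix_path_go
theorem pvGoB_nil : fix_path_go [] = [] := by rw [fix_path_go]

theorem pvGoB_us (rest : List Char) : fix_path_go ('_' :: rest) = '_' :: fix_path_go rest := by
  rw [fix_path_go]
  simp

theorem pvGoB_last (c : Char) (rest : List Char) (h : ¬ c = '_')
    (hdw : List.dropWhile (· ≠ '_') (c :: rest) = []) :
    fix_path_go (c :: rest) = List.takeWhile (· ≠ '_') (c :: rest) := by
  rw [fix_path_go, dif_neg h]
  split
  · rfl
  · rename_i x r heq; rw [hdw] at heq; cases heq

theorem pvGoB_drop (c : Char) (rest : List Char) (x : Char) (rest2 : List Char) (h : ¬ c = '_')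
    (hdw : List.dropWhile (· ≠ '_') (c :: rest) = x :: rest2)
    (hc : (List.takeWhile (· ≠ '_') (c :: rest)).length = 1 ∧
          (List.takeWhile (· ≠ '_') rest2).length = 1) :
    fix_path_go (c :: rest) = List.takeWhile (· ≠ '_') (c :: rest) ++ fix_path_go rest2 := by
  rw [fix_path_go, dif_neg h]
  split
  · rename_i heq; rw [hdw] at heq; cases heq
  · rename_i y r heq
    rw [hdw] at heq
    cases heq
    rw [if_pos hc]

theorem pvGoB_keep (c : Char) (rest : List Char) (x : Char) (rest2 : List Char) (h : ¬ c = '_')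
    (hdw : List.dropWhile (· ≠ '_') (c :: rest) = x :: rest2)
    (hc : ¬ ((List.takeWhile (· ≠ '_') (c :: rest)).length = 1 ∧
          (List.takeWhile (· ≠ '_') rest2).length = 1)) :
    fix_path_go (c :: rest) = List.takeWhile (· ≠ '_') (c :: rest) ++ '_' :: fix_path_go rest2 := by
  rw [fix_path_go, dif_neg h]
  split
  · rename_i heq; rw [hdw] at heq; cases heq
  · rename_i y r heq
    rw [hdw] at heq
    cases heq
    rw [if_neg hc]

-- join of a cons with a provably nonempty tail
theorem pvJoin_us_cons (a : List Char) (t : List (List Char)) (ht : t ≠ []) :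
    PySem.Chars.join ['_'] (a :: t) = a ++ '_' :: PySem.Chars.join ['_'] t := by
  cases t with
  | nil => exact absurd rfl ht
  | cons b r => rw [PySem.Chars.join_cons_cons]; simp

-- the main correspondence: B's scan = join of A's merge of the split
theorem pvMain : ∀ (n : Nat) (cs : List Char), cs.length ≤ n →
    fix_path_go cs = PySem.Chars.join ['_'] (pvMrg (pvSplitU cs) []) := by
  intro n
  induction n with
  | zero =>
    intro cs hlen
    rw [List.length_eq_zero_iff.mp (Nat.le_zero.mp hlen)]
    rw [pvGoB_nil]
    decide
  | succ n ih =>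
    intro cs hlen
    cases cs with
    | nil => rw [pvGoB_nil]; decide
    | cons c rest =>
      by_cases h : c = '_'
      · subst h
        rw [pvGoB_us, ih rest (by simpa using hlen)]
        rw [show pvSplitU ('_' :: rest) = [] :: pvSplitU rest from by simp [pvSplitU]]
        rw [show pvMrg ([] :: pvSplitU rest) [] = [[]] ++ pvMrg (pvSplitU rest) [] from by
          simp [pvMrg]]
        rw [show ([[]] : List (List Char)) ++ pvMrg (pvSplitU rest) [] =
          [] :: pvMrg (pvSplitU rest) [] from rfl]
        rw [pvJoin_us_cons _ _ (pvMrg_ne_nil _ _ (Or.inl (pvSplitU_ne_nil rest)))]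
        simp
      · have hsplit := pvSplitU_decomp (c :: rest)
        cases hdw : List.dropWhile (· ≠ '_') (c :: rest) with
        | nil =>
          rw [hdw] at hsplit
          simp only at hsplit
          rw [pvGoB_last c rest h hdw, hsplit]
          set tok := List.takeWhile (· ≠ '_') (c :: rest) with htok
          by_cases h1 : tok.length = 1
          · rw [show pvMrg [tok] [] = [PySem.Chars.join [] [tok]] from by simp [pvMrg, h1]]
            rw [PySem.Chars.join_singleton, PySem.Chars.join_singleton]
          · rw [show pvMrg [tok] [] = [tok] from by simp [pvMrg, h1]]
            rw [PySem.Chars.join_singleton]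
        | cons x rest2 =>
          rw [hdw] at hsplit
          simp only at hsplit
          set tok := List.takeWhile (· ≠ '_') (c :: rest) with htok
          have hlen2 : rest2.length ≤ n := by
            have hle := List.length_dropWhile_le (· ≠ '_') (c :: rest)
            rw [hdw] at hle
            simp only [List.length_cons] at hle hlen
            omega
          have hsplit2 := pvSplitU_decomp rest2
          by_cases h1 : tok.length = 1 ∧ (List.takeWhile (· ≠ '_') rest2).length = 1
          · -- drop the underscore
            rw [pvGoB_drop c rest x rest2 h hdw h1, hsplit]
            rw [show pvMrg (tok :: pvSplitU rest2) [] = pvMrg (pvSplitU rest2) [tok] from by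
              simp [pvMrg, h1.1]]
            rw [hsplit2]
            rw [pvMrg_chain_single _ _ _ _ (by rw [← hsplit2] at *; exact h1.2)]
            rw [← hsplit2, ← ih rest2 hlen2]
          · rw [pvGoB_keep c rest x rest2 h hdw h1, hsplit]
            by_cases htl : tok.length = 1
            · -- next token is not single: flush [tok] at the next word
              have h2 : ¬ (List.takeWhile (· ≠ '_') rest2).length = 1 := by
                intro hx; exact h1 ⟨htl, hx⟩
              rw [show pvMrg (tok :: pvSplitU rest2) [] = pvMrg (pvSplitU rest2) [tok] from by
                simp [pvMrg, htl]]
              rw [hsplit2]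
              rw [show pvMrg (List.takeWhile (· ≠ '_') rest2 ::
                    (match List.dropWhile (· ≠ '_') rest2 with
                     | [] => [] | _ :: r => pvSplitU r)) [tok] =
                  [PySem.Chars.join [] [tok], List.takeWhile (· ≠ '_') rest2] ++
                    pvMrg (match List.dropWhile (· ≠ '_') rest2 with
                     | [] => [] | _ :: r => pvSplitU r) [] from by
                simp [pvMrg]
                intro hx; exact (h2 (by simpa using hx)).elim]
              rw [PySem.Chars.join_singleton]
              rw [show ([tok, List.takeWhile (· ≠ '_') rest2] ++
                  pvMrg (match List.dropWhile (· ≠ '_') rest2 with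
                   | [] => [] | _ :: r => pvSplitU r) []) =
                tok :: (List.takeWhile (· ≠ '_') rest2 ::
                  pvMrg (match List.dropWhile (· ≠ '_') rest2 with
                   | [] => [] | _ :: r => pvSplitU r) []) from rfl]
              rw [pvJoin_us_cons _ _ (by simp)]
              rw [ih rest2 hlen2, hsplit2]
              rw [show pvMrg (List.takeWhile (· ≠ '_') rest2 ::
                    (match List.dropWhile (· ≠ '_') rest2 with
                     | [] => [] | _ :: r => pvSplitU r)) [] =
                  List.takeWhile (· ≠ '_') rest2 ::
                    pvMrg (match List.dropWhile (· ≠ '_') rest2 with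
                     | [] => [] | _ :: r => pvSplitU r) [] from by
                simp [pvMrg]
                intro hx; exact (h2 (by simpa using hx)).elim]
            · -- tok itself is not single
              rw [show pvMrg (tok :: pvSplitU rest2) [] = tok :: pvMrg (pvSplitU rest2) [] from by
                simp [pvMrg, htl]]
              rw [pvJoin_us_cons _ _ (pvMrg_ne_nil _ _ (Or.inl (pvSplitU_ne_nil rest2)))]
              rw [ih rest2 hlen2]

-- ===== VERDICT (by name: the statement is the Claim_ definition above) =====
theorem fix_path_spec : Claim_equal_fix_path := by
  intro path _
  unfold Spec_fix_path fix_path fix_path_alt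
  simp only
  rw [pvSplitOn_eq]
  show String.mk (PySem.Chars.join ['_']
    (pvFin (List.foldl pvStep ([], []) (pvSplitU path.toList)))) = _
  rw [pvFoldl_mrg]
  simp only [List.nil_append]
  rw [← pvMain path.toList.length path.toList le_rfl]
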